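-- pv_equiv track=rewrite | github.com/DaniTeix/TCC | compare_models.py | entity_sets_from_agg
-- ===== SOURCE A (Python) =====
-- def entity_sets_from_agg(entities_by_type):
--     typed = set()
--     untyped = set()
--     for etype, s in entities_by_type.items():
--         for e in s:
--             typed.add((e, etype))   # identidade com tipo (igual às tabelas)
--             untyped.add(e)          # identidade só por texto (se precisar no futuro)
--     return typed, untyped
-- ===== SOURCE B (Python) =====
-- def entity_sets_from_agg(entities_by_type):
--     # Recursive decomposition: build per-key sets and union them with the
--     # result for the remaining keys, instead of mutating two accumulators.
--     items = list(entities_by_type.items())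
--
--     def go(i):
--         if i == len(items):
--             return set(), set()
--         etype, s = items[i]
--         rest_typed, rest_untyped = go(i + 1)
--         return {(e, etype) for e in s} | rest_typed, set(s) | rest_untyped
--
--     return go(0)
-- ===== Notes on version B (the rewrite author's own statement) =====
-- stated objective: alternative
-- what changed: B replaces A's imperative loop that mutates two shared set accumulators by a recursion over the dict items that builds a per-key typed set and a per-key untyped set and unions each with the recursively computed sets for the remaining keys.
import Mathlib
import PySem

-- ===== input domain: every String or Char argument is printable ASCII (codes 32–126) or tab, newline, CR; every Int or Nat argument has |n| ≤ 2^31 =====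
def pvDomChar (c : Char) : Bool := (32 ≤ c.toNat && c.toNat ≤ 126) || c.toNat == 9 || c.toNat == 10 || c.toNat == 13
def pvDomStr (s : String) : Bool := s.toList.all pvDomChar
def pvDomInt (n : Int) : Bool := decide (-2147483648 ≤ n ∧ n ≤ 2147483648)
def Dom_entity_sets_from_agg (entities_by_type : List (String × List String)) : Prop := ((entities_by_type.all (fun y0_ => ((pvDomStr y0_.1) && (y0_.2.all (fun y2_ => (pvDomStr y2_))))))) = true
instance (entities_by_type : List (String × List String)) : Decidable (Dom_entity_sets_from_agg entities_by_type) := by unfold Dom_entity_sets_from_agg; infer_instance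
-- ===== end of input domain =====

-- B recurses over the dict items, unioning per-key sets with the result for the
-- remaining keys, instead of A's loop mutating two shared accumulators; objective: alternative.
-- ===== PORT A =====
def entity_sets_from_agg (entities_by_type : List (String × List String)) : (List (String × String)) × List String :=
  entities_by_type.foldl
    (fun (st : PySem.Set (String × String) × PySem.Set String) p =>
      p.2.foldl (fun st e => (PySem.Set.add st.1 (e, p.1), PySem.Set.add st.2 e)) st)
    (PySem.Set.empty, PySem.Set.empty)

-- ===== PORT B =====
-- recursion over the item list: per-key sets unioned with the sets for the rest
def esGo : List (String × List String) → PySem.Set (String × String) × PySem.Set String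
  | [] => (PySem.Set.empty, PySem.Set.empty)
  | (etype, s) :: rest =>
    let r := esGo rest
    (PySem.Set.union (PySem.Set.ofList (s.map (fun e => (e, etype)))) r.1,
     PySem.Set.union (PySem.Set.ofList s) r.2)

def entity_sets_from_agg_alt (entities_by_type : List (String × List String)) : (List (String × String)) × List String :=
  esGo entities_by_type

-- ===== PRECONDITION & SPEC =====
def Spec_entity_sets_from_agg (entities_by_type : List (String × List String)) (out : (List (String × String)) × List String) : Prop := out = entity_sets_from_agg_alt entities_by_type
instance (entities_by_type : List (String × List String)) (out : (List (String × String)) × List String) : Decidable (Spec_entity_sets_from_agg entities_by_type out) := by unfold Spec_entity_sets_from_agg; infer_instance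

-- ===== CLAIM =====
def Claim_equal_entity_sets_from_agg : Prop := ∀ (entities_by_type : List (String × List String)), Dom_entity_sets_from_agg entities_by_type → Spec_entity_sets_from_agg entities_by_type (entity_sets_from_agg entities_by_type)

-- ===== LEMMAS AND PROOFS =====

-- update absorbs an ofList on its argument
theorem update_ofList_arg {α : Type} [BEq α] [LawfulBEq α] (s : PySem.Set α) (ys : List α) :
    PySem.Set.update s (PySem.Set.ofList ys) = PySem.Set.update s ys := by
  rw [PySem.Set.update_eq_append_filter s (PySem.Set.ofList ys),
      PySem.Set.update_eq_append_filter s ys, PySem.Set.ofList_ofList]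

-- filtered-out elements already present in s contribute nothing to update
theorem update_filter_of_mem {α : Type} [BEq α] [LawfulBEq α] (p : α → Bool) :
    ∀ (zs : List α) (s : PySem.Set α), (∀ z ∈ zs, p z = false → z ∈ s) →
      PySem.Set.update s (zs.filter p) = PySem.Set.update s zs := by
  intro zs
  induction zs with
  | nil => intro s _; rfl
  | cons z zs ih =>
    intro s h
    by_cases hp : p z = true
    · rw [List.filter_cons_of_pos hp, PySem.Set.update_cons, PySem.Set.update_cons]
      exact ih _ (fun w hw hpw => by
        have := h w (List.mem_cons_of_mem _ hw) hpw
        exact (PySem.Set.mem_add _ _ _).mpr (Or.inl this))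
    · have hz : z ∈ s := h z (List.mem_cons_self ..) (by simpa using hp)
      rw [List.filter_cons_of_neg (by simpa using hp), PySem.Set.update_cons,
          PySem.Set.add_of_mem hz]
      exact ih _ (fun w hw hpw => h w (List.mem_cons_of_mem _ hw) hpw)

-- update-of-update collapses to update by the union
theorem update_update_eq_update_union {α : Type} [BEq α] [LawfulBEq α]
    (T : PySem.Set α) (xs ys : List α) :
    PySem.Set.update (PySem.Set.update T xs) ys
      = PySem.Set.update T (PySem.Set.union (PySem.Set.ofList xs) ys) := by
  have hu : PySem.Set.union (PySem.Set.ofList xs) ys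
      = PySem.Set.ofList xs ++ (PySem.Set.ofList ys).filter
          (fun y => !(PySem.Set.contains (PySem.Set.ofList xs) y)) := by
    rw [← PySem.Set.update_eq_append_filter]; rfl
  rw [hu, PySem.Set.update_append, update_ofList_arg]
  rw [update_filter_of_mem _ _ _ (fun z _ hz => by
    have hzx : z ∈ xs := by
      have : PySem.Set.contains (PySem.Set.ofList xs) z = true := by
        simpa using hz
      exact (PySem.Set.mem_ofList _ _).mp ((PySem.Set.contains_iff _ _).mp this)
    exact (PySem.Set.mem_update _ _ _).mpr (Or.inr hzx))]
  rw [update_ofList_arg]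

-- A's pair fold over the inner list splits into two independent folds
theorem inner_split (s : List String) (t : String)
    (T : PySem.Set (String × String)) (U : PySem.Set String) :
    s.foldl (fun st e => (PySem.Set.add st.1 (e, t), PySem.Set.add st.2 e)) (T, U)
      = (s.foldl (fun T e => PySem.Set.add T (e, t)) T,
         s.foldl (fun U e => PySem.Set.add U e) U) := by
  induction s generalizing T U with
  | nil => rfl
  | cons e s ih => simpa using ih (PySem.Set.add T (e, t)) (PySem.Set.add U e)

-- main invariant: A's fold from (T, U) is update by the components of esGo
theorem main_inv (l : List (String × List String))
    (T : PySem.Set (String × String)) (U : PySem.Set String) :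
    l.foldl
        (fun (st : PySem.Set (String × String) × PySem.Set String) p =>
          p.2.foldl (fun st e => (PySem.Set.add st.1 (e, p.1), PySem.Set.add st.2 e)) st)
        (T, U)
      = (PySem.Set.update T (esGo l).1, PySem.Set.update U (esGo l).2) := by
  induction l generalizing T U with
  | nil => rfl
  | cons p l ih =>
    obtain ⟨t, s⟩ := p
    simp only [List.foldl_cons, inner_split]
    rw [← PySem.Set.update_map_eq_foldl_add]
    have hU : s.foldl (fun U e => PySem.Set.add U e) U = PySem.Set.update U s := rfl
    rw [hU, ih, esGo]
    simp only []
    rw [update_update_eq_update_union, update_update_eq_update_union]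

-- components of esGo have no duplicates
theorem esGo_nodup (l : List (String × List String)) :
    (esGo l).1.Nodup ∧ (esGo l).2.Nodup := by
  induction l with
  | nil => exact ⟨List.nodup_nil, List.nodup_nil⟩
  | cons p l ih =>
    obtain ⟨t, s⟩ := p
    exact ⟨PySem.Set.nodup_union _ _ (PySem.Set.nodup_ofList _),
           PySem.Set.nodup_union _ _ (PySem.Set.nodup_ofList _)⟩

-- ===== VERDICT =====
theorem entity_sets_from_agg_spec : Claim_equal_entity_sets_from_agg := by
  intro l _
  unfold Spec_entity_sets_from_agg entity_sets_from_agg entity_sets_from_agg_alt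
  rw [main_inv l PySem.Set.empty PySem.Set.empty]
  have h := esGo_nodup l
  rw [show (PySem.Set.empty : PySem.Set (String × String)) = ([] : List (String × String)) from rfl]
  rw [show (PySem.Set.empty : PySem.Set String) = ([] : List String) from rfl]
  rw [PySem.Set.update_nil_left, PySem.Set.update_nil_left,
      PySem.Set.ofList_eq_self_of_nodup _ h.1, PySem.Set.ofList_eq_self_of_nodup _ h.2]
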